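-- pv_equiv track=rewrite | github.com/biagiocaldararo/VirtualCoach | test/db-test/19/2017-01-06/quotazioni.py | nome1
-- ===== SOURCE A (Python) =====
-- def nome1(n,x):
--
-- 	c = 0
-- 	trovato = False
-- 	i = 0
-- 	p = 0
--
-- 	if x == 1:
-- 		while not trovato:
-- 			if n[i] == " ":
-- 				p = i
-- 				trovato = True
-- 			i += 1
-- 	else:
-- 		while not trovato:
-- 			if n[i] == " " and c == 1:
-- 				p = i
-- 				trovato = True
-- 			elif n[i] == " ":
-- 				c += 1
-- 			i += 1
--
-- 	return n[:p]
-- ===== SOURCE B (Python) =====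
-- def nome1(n, x):
--     pos = [i for i, ch in enumerate(n) if ch == " "]
--     target = 1 if x == 1 else 2
--     return n[:pos[target - 1]]
-- ===== Notes on version B (the rewrite author's own statement) =====
-- stated objective: simpler
-- what changed: Replaces the two early-stopping while-loops with manual index/counter/flag state by building the list of all space positions in one comprehension and selecting the first or second one by index (raising the same IndexError when absent).
import Mathlib
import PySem

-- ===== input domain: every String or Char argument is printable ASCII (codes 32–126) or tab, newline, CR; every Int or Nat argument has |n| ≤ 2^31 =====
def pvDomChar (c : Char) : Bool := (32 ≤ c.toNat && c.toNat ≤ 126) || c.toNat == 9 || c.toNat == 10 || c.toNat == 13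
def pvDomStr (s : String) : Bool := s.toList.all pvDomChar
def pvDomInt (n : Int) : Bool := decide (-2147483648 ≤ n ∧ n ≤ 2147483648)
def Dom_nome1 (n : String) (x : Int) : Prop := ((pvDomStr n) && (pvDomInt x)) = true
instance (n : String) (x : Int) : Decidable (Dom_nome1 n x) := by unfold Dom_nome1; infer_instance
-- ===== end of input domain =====

-- B replaces A's two stateful scanning while-loops by one list of all space positions plus
-- a single index selection; the equivalence is about return values on inputs where A returns
-- (enough spaces; elsewhere Python A raises IndexError and Pre_ excludes those inputs).

-- ===== PORT A =====
-- while-loop for x == 1: scan from index i until a space is found (none = IndexError)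
def nome1LoopA1 : List Char → Int → Option Int
  | [], _ => none
  | ch :: rest, i => if ch = ' ' then some i else nome1LoopA1 rest (i + 1)

-- while-loop for x != 1: scan counting spaces with c, stop at the space seen with c == 1
def nome1LoopA2 : List Char → Int → Int → Option Int
  | [], _, _ => none
  | ch :: rest, i, c =>
      if ch = ' ' ∧ c = 1 then some i
      else if ch = ' ' then nome1LoopA2 rest (i + 1) (c + 1)
      else nome1LoopA2 rest (i + 1) c

def nome1 (n : String) (x : Int) : String :=
  match (if x = 1 then nome1LoopA1 n.toList 0 else nome1LoopA2 n.toList 0 0) with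
  | some p => String.mk (PySem.List.slice n.toList none (some p))   -- n[:p]
  | none => ""   -- Python raises IndexError here; excluded by Pre_nome1

-- ===== PORT B =====
def nome1_alt (n : String) (x : Int) : String :=
  let pos : List Int :=
    ((PySem.List.enumerate n.toList 0).filter (fun p => p.2 = ' ')).map (·.1)
  let target : Int := if x = 1 then 1 else 2
  match PySem.List.pyGet? pos (target - 1) with
  | some p => String.mk (PySem.List.slice n.toList none (some p))   -- n[:pos[target-1]]
  | none => ""   -- Python raises IndexError here; excluded by Pre_nome1

-- ===== PRECONDITION & SPEC =====
-- Pre_ excludes exactly the inputs where A raises IndexError: fewer than one (x == 1) or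
-- fewer than two (x != 1) spaces in n.
def Pre_nome1 (n : String) (x : Int) : Prop :=
  if x = 1 then 1 ≤ n.toList.count ' ' else 2 ≤ n.toList.count ' '
instance (n : String) (x : Int) : Decidable (Pre_nome1 n x) := by unfold Pre_nome1; infer_instance

def pvWitness_nome1 : String × Int := ("a b c", 2)

def Spec_nome1 (n : String) (x : Int) (out : String) : Prop := out = nome1_alt n x
instance (n : String) (x : Int) (out : String) : Decidable (Spec_nome1 n x out) := by unfold Spec_nome1; infer_instance

-- ===== CLAIM (what is proved, stated in full; the proofs are below) =====
def Claim_equal_nome1 : Prop := ∀ (n : String) (x : Int), Dom_nome1 n x → Pre_nome1 n x → Spec_nome1 n x (nome1 n x)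

-- ===== LEMMAS AND PROOFS =====

/-- the space-position list B builds, with enumeration offset `s` -/
def spIdx (l : List Char) (s : Int) : List Int :=
  ((PySem.List.enumerate l s).filter (fun p => p.2 = ' ')).map (·.1)

theorem spIdx_cons (ch : Char) (rest : List Char) (s : Int) :
    spIdx (ch :: rest) s = if ch = ' ' then s :: spIdx rest (s + 1) else spIdx rest (s + 1) := by
  simp only [spIdx, PySem.List.enumerate_cons, List.filter_cons]
  by_cases h : ch = ' ' <;> simp [h]

theorem loopA1_eq_head? (l : List Char) (s : Int) :
    nome1LoopA1 l s = (spIdx l s).head? := by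
  induction l generalizing s with
  | nil => rfl
  | cons ch rest ih =>
      rw [spIdx_cons]
      by_cases h : ch = ' ' <;> simp [nome1LoopA1, h, ih]

theorem loopA2_c1_eq_head? (l : List Char) (s : Int) :
    nome1LoopA2 l s 1 = (spIdx l s).head? := by
  induction l generalizing s with
  | nil => rfl
  | cons ch rest ih =>
      rw [spIdx_cons]
      by_cases h : ch = ' ' <;> simp [nome1LoopA2, h, ih]

theorem loopA2_c0_eq_get1? (l : List Char) (s : Int) :
    nome1LoopA2 l s 0 = (spIdx l s)[1]? := by
  induction l generalizing s with
  | nil => rfl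
  | cons ch rest ih =>
      rw [spIdx_cons]
      by_cases h : ch = ' '
      · simp [nome1LoopA2, h, loopA2_c1_eq_head? rest (s + 1),
          List.head?_eq_getElem?]
      · simp [nome1LoopA2, h, ih]

-- ===== VERDICT (by name: the statement is the Claim_ definition above) =====
theorem nome1_spec : Claim_equal_nome1 := by
  intro n x _ _
  unfold Spec_nome1 nome1 nome1_alt
  by_cases hx : x = 1
  · have : PySem.List.pyGet? (spIdx n.toList 0) ((1 : Int) - 1) = (spIdx n.toList 0).head? := by
      simp [PySem.List.pyGet?_zero, List.head?_eq_getElem?]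
    simp only [hx, if_true, loopA1_eq_head? n.toList 0, spIdx] at *
    rw [this]
  · have : PySem.List.pyGet? (spIdx n.toList 0) ((2 : Int) - 1) = (spIdx n.toList 0)[1]? := by
      have h1 : ((2 : Int) - 1) = ((1 : Nat) : Int) := by norm_num
      rw [h1, PySem.List.pyGet?_natCast]
    simp only [hx, if_false, loopA2_c0_eq_get1? n.toList 0, spIdx] at *
    rw [this]
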